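-- pv_equiv track=rewrite | github.com/tillo13/digital_empire_website | utilities/youtube_utils.py | process_video_stats
-- ===== SOURCE A (Python) =====
-- from typing import Dict, List, Optional, Any, Tuple
--
-- def process_video_stats(videos_data: List[Dict[str, Any]]) -> Dict[str, Any]:
--     """Process video statistics to extract engagement metrics"""
--     total_comments = 0
--     total_likes = 0
--     total_video_views = 0
--
--     for video in videos_data:
--         stats = video.get('statistics', {})
--         total_comments += int(stats.get('commentCount', 0))
--         total_likes += int(stats.get('likeCount', 0))
--         total_video_views += int(stats.get('viewCount', 0))
--
--     return {
--         'total_comments': total_comments,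
--         'total_likes': total_likes,
--         'total_video_views': total_video_views
--     }
-- ===== SOURCE B (Python) =====
-- from typing import Dict, List, Any
--
-- _METRIC_KEYS = {
--     'commentCount': 'total_comments',
--     'likeCount': 'total_likes',
--     'viewCount': 'total_video_views',
-- }
--
-- def process_video_stats(videos_data: List[Dict[str, Any]]) -> Dict[str, Any]:
--     """Process video statistics to extract engagement metrics"""
--     totals = {'total_comments': 0, 'total_likes': 0, 'total_video_views': 0}
--     for video in videos_data:
--         for key, value in video.get('statistics', {}).items():
--             out = _METRIC_KEYS.get(key)
--             if out is not None:
--                 totals[out] += int(value)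
--     return totals
-- ===== Notes on version B (the rewrite author's own statement) =====
-- stated objective: alternative
-- what changed: Instead of looking up the three fixed metric keys in each video's statistics dict, B streams over whatever (key, value) items each statistics dict actually contains and tallies them into a pre-initialised totals dict through a key-translation table, skipping non-metric keys; dict keys are unique, so the tally equals A's three lookups.
import Mathlib
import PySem

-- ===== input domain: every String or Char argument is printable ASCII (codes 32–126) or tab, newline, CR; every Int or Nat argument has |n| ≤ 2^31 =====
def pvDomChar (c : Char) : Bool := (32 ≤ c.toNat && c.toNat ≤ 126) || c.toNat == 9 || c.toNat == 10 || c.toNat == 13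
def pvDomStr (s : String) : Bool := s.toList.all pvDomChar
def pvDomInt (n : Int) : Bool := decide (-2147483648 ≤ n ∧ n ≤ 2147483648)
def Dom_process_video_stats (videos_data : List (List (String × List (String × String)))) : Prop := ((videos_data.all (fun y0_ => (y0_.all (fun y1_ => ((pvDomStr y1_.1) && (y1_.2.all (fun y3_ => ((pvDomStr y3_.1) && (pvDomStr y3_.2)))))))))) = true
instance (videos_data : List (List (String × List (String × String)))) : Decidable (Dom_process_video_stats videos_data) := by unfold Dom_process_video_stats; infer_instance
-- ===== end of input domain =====

-- B tallies whatever statistics items each video actually has through a key-translation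
-- table into a totals dict, instead of A's three fixed-key lookups per video (alternative).

-- ===== PORT A =====
-- int(stats.get(key, 0)): missing key gives literal 0; present value is parsed with int();
-- Pre_ excludes inputs where int() would raise, so getD 0 here is never the ValueError case.
def pvIntGetA (stats : List (String × String)) (key : String) : Int :=
  match PySem.Dict.get? (PySem.Dict.ofList stats) key with
  | none => 0
  | some s => (PySem.Int.ofStr? s).getD 0

def process_video_stats (videos_data : List (List (String × List (String × String)))) : List (String × Int) :=
  let acc := videos_data.foldl
    (fun (t : Int × Int × Int) video =>
      let stats := (PySem.Dict.get? (PySem.Dict.ofList video) "statistics").getD []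
      (t.1 + pvIntGetA stats "commentCount",
       t.2.1 + pvIntGetA stats "likeCount",
       t.2.2 + pvIntGetA stats "viewCount"))
    (0, 0, 0)
  [("total_comments", acc.1), ("total_likes", acc.2.1), ("total_video_views", acc.2.2)]

-- ===== PORT B =====
-- _METRIC_KEYS = {'commentCount': 'total_comments', 'likeCount': 'total_likes', 'viewCount': 'total_video_views'}
def pvMetricKeysB : PySem.Dict String String :=
  PySem.Dict.ofList
    [("commentCount", "total_comments"), ("likeCount", "total_likes"), ("viewCount", "total_video_views")]

-- inner-loop body: out = _METRIC_KEYS.get(key); if out is not None: totals[out] += int(value)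
-- (totals[out] is always present when this fires, so Dict.modify's default 0 is never used)
def pvTallyItemB (totals : PySem.Dict String Int) (kv : String × String) : PySem.Dict String Int :=
  match PySem.Dict.get? pvMetricKeysB kv.1 with
  | none => totals
  | some out => PySem.Dict.modify totals out 0 (· + (PySem.Int.ofStr? kv.2).getD 0)

def process_video_stats_alt (videos_data : List (List (String × List (String × String)))) : List (String × Int) :=
  let totals0 : PySem.Dict String Int :=
    PySem.Dict.ofList [("total_comments", 0), ("total_likes", 0), ("total_video_views", 0)]
  (videos_data.foldl
    (fun totals video =>
      ((PySem.Dict.ofList ((PySem.Dict.get? (PySem.Dict.ofList video) "statistics").getD [])).items).foldl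
        pvTallyItemB totals)
    totals0).items

-- ===== PRECONDITION & SPEC =====
-- Pre_ excludes exactly the inputs on which A's int(...) raises ValueError: a present
-- commentCount/likeCount/viewCount value that is not an int-parseable string (B raises there too).
def Pre_process_video_stats (videos_data : List (List (String × List (String × String)))) : Prop :=
  ∀ video ∈ videos_data, ∀ key ∈ (["commentCount", "likeCount", "viewCount"] : List String),
    (match PySem.Dict.get? (PySem.Dict.ofList ((PySem.Dict.get? (PySem.Dict.ofList video) "statistics").getD [])) key with
     | none => true
     | some s => (PySem.Int.ofStr? s).isSome) = true
instance (videos_data : List (List (String × List (String × String)))) : Decidable (Pre_process_video_stats videos_data) := by unfold Pre_process_video_stats; infer_instance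

def pvWitness_process_video_stats : (List (List (String × List (String × String)))) :=
  [[("statistics", [("commentCount", "3"), ("likeCount", "4"), ("viewCount", "10")])], [("id", [])]]

def Spec_process_video_stats (videos_data : List (List (String × List (String × String)))) (out : List (String × Int)) : Prop := out = process_video_stats_alt videos_data
instance (videos_data : List (List (String × List (String × String)))) (out : List (String × Int)) : Decidable (Spec_process_video_stats videos_data out) := by unfold Spec_process_video_stats; infer_instance

-- ===== CLAIM (what is proved, stated in full; the proofs are below) =====
def Claim_equal_process_video_stats : Prop := ∀ (videos_data : List (List (String × List (String × String)))), Dom_process_video_stats videos_data → Pre_process_video_stats videos_data → Spec_process_video_stats videos_data (process_video_stats videos_data)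

-- ===== LEMMAS AND PROOFS =====

-- the totals dict always has exactly this shape
def pvTot (a b c : Int) : PySem.Dict String Int :=
  ⟨[("total_comments", a), ("total_likes", b), ("total_video_views", c)]⟩

-- first-match value of a metric key in an items list, parsed (B-side view of A's get)
def pvLook (l : List (String × String)) (key : String) : Int :=
  match l.find? (fun p => p.1 == key) with
  | none => 0
  | some p => (PySem.Int.ofStr? p.2).getD 0

theorem pvLook_not_mem (l : List (String × String)) (key : String)
    (h : key ∉ l.map Prod.fst) : pvLook l key = 0 := by
  unfold pvLook
  rw [List.find?_eq_none.mpr]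
  intro p hp hbeq
  exact h (List.mem_map.mpr ⟨p, hp, beq_iff_eq.mp hbeq⟩)

theorem pvTallyItemB_tot (a b c : Int) (kv : String × String) :
    pvTallyItemB (pvTot a b c) kv =
      if kv.1 = "commentCount" then pvTot (a + (PySem.Int.ofStr? kv.2).getD 0) b c
      else if kv.1 = "likeCount" then pvTot a (b + (PySem.Int.ofStr? kv.2).getD 0) c
      else if kv.1 = "viewCount" then pvTot a b (c + (PySem.Int.ofStr? kv.2).getD 0)
      else pvTot a b c := by
  obtain ⟨k, v⟩ := kv
  by_cases h1 : k = "commentCount"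
  · subst h1
    simp [pvTallyItemB, pvMetricKeysB, pvTot, PySem.Dict.modify, PySem.Dict.insert,
      PySem.Dict.contains, PySem.Dict.getD, PySem.Dict.get?, PySem.Dict.ofList,
      PySem.Dict.update, PySem.Dict.empty]
  by_cases h2 : k = "likeCount"
  · subst h2
    simp [pvTallyItemB, pvMetricKeysB, pvTot, PySem.Dict.modify, PySem.Dict.insert,
      PySem.Dict.contains, PySem.Dict.getD, PySem.Dict.get?, PySem.Dict.ofList,
      PySem.Dict.update, PySem.Dict.empty]
  by_cases h3 : k = "viewCount"
  · subst h3
    simp [pvTallyItemB, pvMetricKeysB, pvTot, PySem.Dict.modify, PySem.Dict.insert,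
      PySem.Dict.contains, PySem.Dict.getD, PySem.Dict.get?, PySem.Dict.ofList,
      PySem.Dict.update, PySem.Dict.empty]
  · have e1 : ("commentCount" == k) = false := by simp [Ne.symm h1]
    have e2 : ("likeCount" == k) = false := by simp [Ne.symm h2]
    have e3 : ("viewCount" == k) = false := by simp [Ne.symm h3]
    simp [pvTallyItemB, pvMetricKeysB, PySem.Dict.get?, PySem.Dict.ofList,
      PySem.Dict.update, PySem.Dict.empty, PySem.Dict.insert, PySem.Dict.contains,
      List.find?, e1, e2, e3]
    rw [if_neg h1, if_neg h2, if_neg h3]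

theorem pvLook_cons_eq (k v : String) (rest : List (String × String)) :
    pvLook ((k, v) :: rest) k = (PySem.Int.ofStr? v).getD 0 := by
  simp [pvLook, List.find?]

theorem pvLook_cons_ne (k v key : String) (rest : List (String × String)) (h : ¬ k = key) :
    pvLook ((k, v) :: rest) key = pvLook rest key := by
  have hb : (k == key) = false := by simp [h]
  simp [pvLook, List.find?, hb]

-- the inner loop over a nodup-keyed items list adds exactly the three first-match values
theorem pv_inner (l : List (String × String)) (hnd : (l.map Prod.fst).Nodup)
    (a b c : Int) :
    l.foldl pvTallyItemB (pvTot a b c) =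
      pvTot (a + pvLook l "commentCount") (b + pvLook l "likeCount") (c + pvLook l "viewCount") := by
  induction l generalizing a b c with
  | nil => simp [pvLook]
  | cons kv rest ih =>
    obtain ⟨k, v⟩ := kv
    rw [List.map_cons] at hnd
    obtain ⟨hk, hrest⟩ := List.nodup_cons.mp hnd
    rw [List.foldl_cons, pvTallyItemB_tot]
    by_cases h1 : k = "commentCount"
    · subst h1
      simp only [reduceIte]
      rw [ih hrest]
      have h0 := pvLook_not_mem rest "commentCount" hk
      simp [pvLook_cons_eq, pvLook_cons_ne, h0]
    by_cases h2 : k = "likeCount"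
    · subst h2
      simp only [reduceIte]
      rw [if_neg h1, ih hrest]
      have h0 := pvLook_not_mem rest "likeCount" hk
      simp [pvLook_cons_eq, pvLook_cons_ne, h0]
    by_cases h3 : k = "viewCount"
    · subst h3
      simp only [reduceIte]
      rw [if_neg h1, if_neg h2, ih hrest]
      have h0 := pvLook_not_mem rest "viewCount" hk
      simp [pvLook_cons_eq, pvLook_cons_ne, h0]
    · rw [if_neg h1, if_neg h2, if_neg h3, ih hrest]
      simp [pvLook_cons_ne, h1, h2, h3]

-- A's per-video get equals the first-match value over the dict's items
theorem pvLook_items (stats : List (String × String)) (key : String) :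
    pvLook (PySem.Dict.ofList stats).items key = pvIntGetA stats key := by
  unfold pvLook pvIntGetA PySem.Dict.get?
  cases (PySem.Dict.ofList stats).items.find? (fun p => p.1 == key) <;> simp

theorem pv_outer (vs : List (List (String × List (String × String)))) (a b c : Int) :
    vs.foldl
      (fun totals video =>
        ((PySem.Dict.ofList ((PySem.Dict.get? (PySem.Dict.ofList video) "statistics").getD [])).items).foldl
          pvTallyItemB totals)
      (pvTot a b c)
    = (fun t : Int × Int × Int => pvTot t.1 t.2.1 t.2.2)
        (vs.foldl
          (fun (t : Int × Int × Int) video =>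
            let stats := (PySem.Dict.get? (PySem.Dict.ofList video) "statistics").getD []
            (t.1 + pvIntGetA stats "commentCount",
             t.2.1 + pvIntGetA stats "likeCount",
             t.2.2 + pvIntGetA stats "viewCount"))
          (a, b, c)) := by
  induction vs generalizing a b c with
  | nil => simp
  | cons v rest ih =>
    simp only [List.foldl_cons]
    have hnd : (((PySem.Dict.ofList ((PySem.Dict.get? (PySem.Dict.ofList v) "statistics").getD [])).items).map Prod.fst).Nodup := by
      have := PySem.Dict.nodup_keys_ofList (κ := String) (ν := String)
        ((PySem.Dict.get? (PySem.Dict.ofList v) "statistics").getD [])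
      simpa [PySem.Dict.keys] using this
    rw [pv_inner _ hnd, pvLook_items, pvLook_items, pvLook_items, ih]

-- ===== VERDICT (by name: the statement is the Claim_ definition above) =====
theorem process_video_stats_spec : Claim_equal_process_video_stats := by
  intro videos_data _ _
  unfold Spec_process_video_stats process_video_stats process_video_stats_alt
  have h0 : PySem.Dict.ofList ([("total_comments", 0), ("total_likes", 0), ("total_video_views", 0)] : List (String × Int)) = pvTot 0 0 0 := by rfl
  simp only [h0, pv_outer]
  rfl
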